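-- pv_equiv track=rewrite | github.com/eden-fenster/projects_2022 | practice/shortest_road.py | shortest_road
-- ===== SOURCE A (Python) =====
-- from typing import List
--
-- def shortest_road(first: List[int],
--                   second: List[int], location: int, switched: bool, starting_at: int, sum_min: int) -> int:
--     # If end is reached, return sum of minutes.
--     if location == len(first):
--         return sum_min
--     # If we already switched, move one way.
--     if switched:
--         if starting_at == 2:
--             return shortest_road(first=first, second=second, location=location + 1, switched=switched,
--                                  starting_at=starting_at, sum_min=sum_min + first[location])
--
--         return shortest_road(first=first, second=second, location=location + 1, switched=switched,
--                              starting_at=starting_at, sum_min=sum_min + second[location])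
--     # Else, move both ways and return max value.
--     if starting_at == 2:
--         return min(shortest_road(first=first, second=second, location=location + 1, switched=switched,
--                                  starting_at=starting_at, sum_min=sum_min + second[location]),
--                    shortest_road(first=first, second=second, location=location + 1, switched=True,
--                                  starting_at=starting_at, sum_min=sum_min + second[location]))
--     return min(shortest_road(first=first, second=second, location=location + 1, switched=switched,
--                              starting_at=starting_at, sum_min=sum_min + first[location]),
--                shortest_road(first=first, second=second, location=location + 1, switched=True,
--                              starting_at=starting_at, sum_min=sum_min + first[location]))
-- ===== SOURCE B (Python) =====
-- from typing import List
--
-- def shortest_road(first: List[int],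
--                   second: List[int], location: int, switched: bool, starting_at: int, sum_min: int) -> int:
--     # One forward pass with a running switch-point cost instead of A's branching recursion.
--     n = len(first)
--     if starting_at == 2:
--         start, other = second, first
--     else:
--         start, other = first, second
--     if location == n:
--         return sum_min
--     if switched:
--         return sum_min + sum(other[i] for i in range(location, n))
--     # cost of switching right after index s: sum(start[location..s]) + sum(other[s+1..n-1]).
--     cur = start[location] + sum(other[i] for i in range(location + 1, n))
--     best = cur
--     for i in range(location + 1, n):
--         cur += start[i] - other[i]
--         best = min(best, cur)
--     return sum_min + best
-- ===== Notes on version B (the rewrite author's own statement) =====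
-- stated objective: faster
-- what changed: A's branching recursion (which re-walks the whole switched suffix at every position) is replaced by a single forward pass keeping a running cost of 'switch right after index s' (prefix of the starting array plus suffix of the other array) and its minimum.
import Mathlib
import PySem

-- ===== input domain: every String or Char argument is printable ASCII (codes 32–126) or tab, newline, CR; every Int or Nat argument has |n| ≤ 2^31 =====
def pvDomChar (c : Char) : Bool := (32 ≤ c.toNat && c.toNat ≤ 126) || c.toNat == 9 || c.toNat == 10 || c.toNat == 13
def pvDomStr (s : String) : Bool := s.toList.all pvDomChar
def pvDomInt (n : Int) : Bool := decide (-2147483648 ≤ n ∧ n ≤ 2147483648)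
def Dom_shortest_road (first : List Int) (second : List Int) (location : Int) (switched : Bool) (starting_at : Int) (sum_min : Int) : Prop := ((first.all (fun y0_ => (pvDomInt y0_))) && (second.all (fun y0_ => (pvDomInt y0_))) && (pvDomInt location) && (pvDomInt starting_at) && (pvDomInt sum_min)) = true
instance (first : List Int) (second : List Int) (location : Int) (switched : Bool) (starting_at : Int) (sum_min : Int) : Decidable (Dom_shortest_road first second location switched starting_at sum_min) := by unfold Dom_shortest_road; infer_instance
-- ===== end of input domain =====

-- B replaces A's branching recursion by a single forward pass over a running switch-point cost: asymptotically faster.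


-- ===== PORT A =====
-- A's recursion, fuel = number of steps to len(first) (Python diverges for location > len(first);
-- those inputs are outside Pre_). pyGetD mirrors Python list indexing (incl. negative wraparound);
-- out-of-range accesses (Python IndexError) are outside Pre_.
def shortest_road_go (first : List Int) (second : List Int) : Nat → Int → Bool → Int → Int → Int
  | 0, _, _, _, sum_min => sum_min
  | fuel + 1, location, switched, starting_at, sum_min =>
    if location = (first.length : Int) then sum_min
    else if switched then
      if starting_at = 2 then
        shortest_road_go first second fuel (location + 1) switched starting_at
          (sum_min + PySem.List.pyGetD first location 0)
      else
        shortest_road_go first second fuel (location + 1) switched starting_at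
          (sum_min + PySem.List.pyGetD second location 0)
    else if starting_at = 2 then
      min (shortest_road_go first second fuel (location + 1) switched starting_at
            (sum_min + PySem.List.pyGetD second location 0))
          (shortest_road_go first second fuel (location + 1) true starting_at
            (sum_min + PySem.List.pyGetD second location 0))
    else
      min (shortest_road_go first second fuel (location + 1) switched starting_at
            (sum_min + PySem.List.pyGetD first location 0))
          (shortest_road_go first second fuel (location + 1) true starting_at
            (sum_min + PySem.List.pyGetD first location 0))

def shortest_road (first : List Int) (second : List Int) (location : Int) (switched : Bool) (starting_at : Int) (sum_min : Int) : Int :=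
  shortest_road_go first second ((first.length : Int) - location).toNat location switched starting_at sum_min

-- ===== PORT B =====
def shortest_road_alt (first : List Int) (second : List Int) (location : Int) (switched : Bool) (starting_at : Int) (sum_min : Int) : Int :=
  let n : Int := first.length
  let start := if starting_at = 2 then second else first
  let other := if starting_at = 2 then first else second
  if location = n then sum_min
  else if switched then
    sum_min + (PySem.List.pyRange location n 1).foldl
      (fun acc i => acc + PySem.List.pyGetD other i 0) 0
  else
    let cur := PySem.List.pyGetD start location 0 +
      (PySem.List.pyRange (location + 1) n 1).foldl
        (fun acc i => acc + PySem.List.pyGetD other i 0) 0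
    let p := (PySem.List.pyRange (location + 1) n 1).foldl
      (fun (cb : Int × Int) i =>
        let c := cb.1 + PySem.List.pyGetD start i 0 - PySem.List.pyGetD other i 0
        (c, min cb.2 c)) (cur, cur)
    sum_min + p.2

-- ===== PRECONDITION & SPEC =====
-- Pre_ = exactly the inputs where Python A returns: location ≤ len(first) (else unbounded recursion),
-- and every list index A touches is in Python range (else IndexError).
def Pre_shortest_road (first : List Int) (second : List Int) (location : Int) (switched : Bool) (starting_at : Int) (sum_min : Int) : Prop :=
  location ≤ (first.length : Int) ∧
  (if switched then
     (if starting_at = 2 then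
        (location < (first.length : Int) → -(first.length : Int) ≤ location)
      else
        (location < (first.length : Int) →
          -(second.length : Int) ≤ location ∧ (first.length : Int) ≤ (second.length : Int)))
   else
     (if starting_at = 2 then
        (location < (first.length : Int) →
          -(second.length : Int) ≤ location ∧ (first.length : Int) ≤ (second.length : Int)) ∧
        (location + 1 < (first.length : Int) → -(first.length : Int) ≤ location + 1)
      else
        (location < (first.length : Int) → -(first.length : Int) ≤ location) ∧
        (location + 1 < (first.length : Int) →
          -(second.length : Int) ≤ location + 1 ∧ (first.length : Int) ≤ (second.length : Int))))
instance (first : List Int) (second : List Int) (location : Int) (switched : Bool) (starting_at : Int) (sum_min : Int) : Decidable (Pre_shortest_road first second location switched starting_at sum_min) := by unfold Pre_shortest_road; infer_instance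

def pvWitness_shortest_road : List Int × List Int × Int × Bool × Int × Int := ([3, 1, 4], [2, 7, 1], 0, false, 1, 0)

def Spec_shortest_road (first : List Int) (second : List Int) (location : Int) (switched : Bool) (starting_at : Int) (sum_min : Int) (out : Int) : Prop := out = shortest_road_alt first second location switched starting_at sum_min
instance (first : List Int) (second : List Int) (location : Int) (switched : Bool) (starting_at : Int) (sum_min : Int) (out : Int) : Decidable (Spec_shortest_road first second location switched starting_at sum_min out) := by unfold Spec_shortest_road; infer_instance

-- ===== CLAIM (what is proved, stated in full; the proofs are below) =====
def Claim_equal_shortest_road : Prop := ∀ (first : List Int) (second : List Int) (location : Int) (switched : Bool) (starting_at : Int) (sum_min : Int), Dom_shortest_road first second location switched starting_at sum_min → Pre_shortest_road first second location switched starting_at sum_min → Spec_shortest_road first second location switched starting_at sum_min (shortest_road first second location switched starting_at sum_min)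

-- ===== LEMMAS AND PROOFS =====

-- sum of other[loc..loc+k-1] (Python indexing)
def srOSum (other : List Int) (loc : Int) : Nat → Int
  | 0 => 0
  | k + 1 => PySem.List.pyGetD other loc 0 + srOSum other (loc + 1) k

-- value of A's unswitched recursion over k remaining steps
def srMVal (start other : List Int) (loc : Int) : Nat → Int
  | 0 => 0
  | k + 1 => PySem.List.pyGetD start loc 0 +
      min (srMVal start other (loc + 1) k) (srOSum other (loc + 1) k)

theorem sr_go_switched (first second : List Int) (starting_at : Int) :
    ∀ (k : Nat) (loc sm : Int), loc + (k : Int) = (first.length : Int) →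
      shortest_road_go first second k loc true starting_at sm
        = sm + srOSum (if starting_at = 2 then first else second) loc k := by
  intro k
  induction k with
  | zero => intro loc sm h; simp [shortest_road_go, srOSum]
  | succ k ih =>
    intro loc sm h
    have hne : loc ≠ (first.length : Int) := by push_cast at h ⊢; omega
    have h' : (loc + 1) + (k : Int) = (first.length : Int) := by push_cast at h ⊢; omega
    by_cases h2 : starting_at = 2
    · subst h2
      simp only [shortest_road_go, if_neg hne, ite_true]
      rw [ih (loc + 1) (sm + PySem.List.pyGetD first loc 0) h']
      simp [srOSum]; ring
    · simp only [shortest_road_go, if_neg hne, ite_true, if_neg h2]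
      rw [ih (loc + 1) (sm + PySem.List.pyGetD second loc 0) h']
      simp [srOSum, if_neg h2]; ring

theorem sr_go_unswitched (first second : List Int) (starting_at : Int) :
    ∀ (k : Nat) (loc sm : Int), loc + (k : Int) = (first.length : Int) →
      shortest_road_go first second k loc false starting_at sm
        = sm + srMVal (if starting_at = 2 then second else first)
            (if starting_at = 2 then first else second) loc k := by
  intro k
  induction k with
  | zero => intro loc sm h; simp [shortest_road_go, srMVal]
  | succ k ih =>
    intro loc sm h
    have hne : loc ≠ (first.length : Int) := by push_cast at h ⊢; omega
    have h' : (loc + 1) + (k : Int) = (first.length : Int) := by push_cast at h ⊢; omega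
    by_cases h2 : starting_at = 2
    · subst h2
      simp only [shortest_road_go, if_neg hne, Bool.false_eq_true, ite_false]
      rw [ih (loc + 1) (sm + PySem.List.pyGetD second loc 0) h',
        sr_go_switched first second 2 k (loc + 1)
          (sm + PySem.List.pyGetD second loc 0) h']
      simp [srMVal]
      omega
    · simp only [shortest_road_go, if_neg hne, Bool.false_eq_true, ite_false, if_neg h2]
      rw [ih (loc + 1) (sm + PySem.List.pyGetD first loc 0) h',
        sr_go_switched first second starting_at k (loc + 1)
          (sm + PySem.List.pyGetD first loc 0) h']
      simp only [if_neg h2, srMVal]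
      omega

-- B's switched fold equals srOSum
theorem fold_osum (other : List Int) :
    ∀ (k : Nat) (loc acc : Int),
      (PySem.List.pyRange loc (loc + (k : Int)) 1).foldl
          (fun a i => a + PySem.List.pyGetD other i 0) acc
        = acc + srOSum other loc k := by
  intro k
  induction k with
  | zero => intro loc acc; simp [srOSum]
  | succ k ih =>
    intro loc acc
    have hlt : loc < loc + ((k + 1 : Nat) : Int) := by push_cast; omega
    rw [PySem.List.pyRange_one_cons hlt]
    have : loc + ((k + 1 : Nat) : Int) = (loc + 1) + (k : Int) := by push_cast; ring
    rw [this]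
    simp only [List.foldl_cons, ih (loc + 1)]
    simp [srOSum]; ring

-- the step function of B's main fold
def srStep (start other : List Int) (cb : Int × Int) (i : Int) : Int × Int :=
  let c := cb.1 + PySem.List.pyGetD start i 0 - PySem.List.pyGetD other i 0
  (c, min cb.2 c)

-- translation invariance of the fold state
theorem fold_step_shift (start other : List Int) :
    ∀ (L : List Int) (c b x : Int),
      (L.foldl (srStep start other) (c + x, b + x))
        = ((L.foldl (srStep start other) (c, b)).1 + x,
           (L.foldl (srStep start other) (c, b)).2 + x) := by
  intro L
  induction L with
  | nil => intro c b x; rfl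
  | cons i L ih =>
    intro c b x
    simp only [List.foldl_cons, srStep]
    have h1 : c + x + PySem.List.pyGetD start i 0 - PySem.List.pyGetD other i 0
        = (c + PySem.List.pyGetD start i 0 - PySem.List.pyGetD other i 0) + x := by ring
    rw [h1]
    have h2 : min (b + x) (c + PySem.List.pyGetD start i 0 - PySem.List.pyGetD other i 0 + x)
        = min b (c + PySem.List.pyGetD start i 0 - PySem.List.pyGetD other i 0) + x := by omega
    rw [h2, ih]

-- the running minimum splits over min in its initial value
theorem fold_step_min (start other : List Int) :
    ∀ (L : List Int) (c b1 b2 : Int),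
      (L.foldl (srStep start other) (c, min b1 b2)).2
        = min b1 (L.foldl (srStep start other) (c, b2)).2 := by
  intro L
  induction L with
  | nil => intro c b1 b2; rfl
  | cons i L ih =>
    intro c b1 b2
    simp only [List.foldl_cons, srStep]
    have : min (min b1 b2) (c + PySem.List.pyGetD start i 0 - PySem.List.pyGetD other i 0)
        = min b1 (min b2 (c + PySem.List.pyGetD start i 0 - PySem.List.pyGetD other i 0)) := by omega
    rw [this, ih]

-- key lemma: B's forward fold computes A's unswitched value
theorem fold_mval (start other : List Int) :
    ∀ (k : Nat) (loc : Int),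
      ((PySem.List.pyRange (loc + 1) (loc + 1 + (k : Int)) 1).foldl (srStep start other)
          (PySem.List.pyGetD start loc 0 + srOSum other (loc + 1) k,
           PySem.List.pyGetD start loc 0 + srOSum other (loc + 1) k)).2
        = srMVal start other loc (k + 1) := by
  intro k
  induction k with
  | zero =>
    intro loc
    simp [srOSum, srMVal]
  | succ k ih =>
    intro loc
    have hlt : loc + 1 < loc + 1 + ((k + 1 : Nat) : Int) := by push_cast; omega
    rw [PySem.List.pyRange_one_cons hlt]
    have hb : loc + 1 + ((k + 1 : Nat) : Int) = (loc + 1) + 1 + (k : Int) := by push_cast; ring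
    rw [hb]
    simp only [List.foldl_cons]
    have hC : srOSum other (loc + 1) (k + 1)
        = PySem.List.pyGetD other (loc + 1) 0 + srOSum other (loc + 1 + 1) k := by
      simp [srOSum]
    have hstep : srStep start other
        (PySem.List.pyGetD start loc 0 + srOSum other (loc + 1) (k + 1),
         PySem.List.pyGetD start loc 0 + srOSum other (loc + 1) (k + 1)) (loc + 1)
        = ((PySem.List.pyGetD start (loc + 1) 0 + srOSum other (loc + 1 + 1) k)
             + PySem.List.pyGetD start loc 0,
           min (PySem.List.pyGetD start loc 0 + srOSum other (loc + 1) (k + 1))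
             ((PySem.List.pyGetD start (loc + 1) 0 + srOSum other (loc + 1 + 1) k)
               + PySem.List.pyGetD start loc 0)) := by
      simp only [srStep, Prod.mk.injEq]
      rw [hC]
      constructor <;> omega
    rw [hstep]
    rw [fold_step_min start other]
    rw [fold_step_shift start other]
    rw [ih (loc + 1)]
    have hm : srMVal start other loc (k + 1 + 1)
        = PySem.List.pyGetD start loc 0 +
            min (srMVal start other (loc + 1) (k + 1)) (srOSum other (loc + 1) (k + 1)) := by
      simp [srMVal]
    rw [hm]
    omega

theorem shortest_road_alt_char (first second : List Int) (location : Int) (switched : Bool)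
    (starting_at : Int) (sum_min : Int) (hle : location ≤ (first.length : Int)) :
    shortest_road_alt first second location switched starting_at sum_min
      = sum_min +
        (if location = (first.length : Int) then 0
         else if switched then
           srOSum (if starting_at = 2 then first else second) location
             (((first.length : Int) - location).toNat)
         else
           srMVal (if starting_at = 2 then second else first)
             (if starting_at = 2 then first else second) location
             (((first.length : Int) - location).toNat)) := by
  by_cases hn : location = (first.length : Int)
  · simp [shortest_road_alt, hn]
  · have hlt : location < (first.length : Int) := lt_of_le_of_ne hle hn
    set start := if starting_at = 2 then second else first with hs
    set other := if starting_at = 2 then first else second with ho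
    set k : Nat := ((first.length : Int) - location).toNat with hk
    obtain ⟨k', hk'⟩ : ∃ k', k = k' + 1 := by
      refine ⟨k - 1, ?_⟩; omega
    have hkz : (first.length : Int) = location + (k : Int) := by
      simp [hk]; omega
    by_cases hsw : switched = true
    · simp only [shortest_road_alt, hn, hsw, ite_true, ite_false, ← hs, ← ho]
      rw [hkz, fold_osum other k location 0]
      simp
    · simp only [Bool.not_eq_true] at hsw
      simp only [shortest_road_alt, ← hs, ← ho, hsw, Bool.false_eq_true, ite_false, hn]
      have hk1 : (first.length : Int) = location + 1 + (k' : Int) := by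
        rw [hkz, hk']; push_cast; ring
      rw [hk1, fold_osum other k' (location + 1) 0]
      simp only [zero_add]
      have hfun : (fun (cb : Int × Int) i =>
          (cb.1 + PySem.List.pyGetD start i 0 - PySem.List.pyGetD other i 0,
            min cb.2 (cb.1 + PySem.List.pyGetD start i 0 - PySem.List.pyGetD other i 0)))
          = srStep start other := by
        funext cb i; simp [srStep]
      rw [hfun, fold_mval start other k' location, hk']

-- ===== VERDICT (by name: the statement is the Claim_ definition above) =====
theorem shortest_road_spec : Claim_equal_shortest_road := by
  intro first second location switched starting_at sum_min _ hpre
  obtain ⟨hle, _⟩ := hpre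
  unfold Spec_shortest_road shortest_road
  set k : Nat := ((first.length : Int) - location).toNat with hk
  have hkz : location + (k : Int) = (first.length : Int) := by simp [hk]; omega
  rw [shortest_road_alt_char first second location switched starting_at sum_min hle]
  by_cases hn : location = (first.length : Int)
  · have hk0 : k = 0 := by simp [hk]; omega
    simp [hk0, shortest_road_go, hn]
  · cases switched with
    | true =>
      rw [sr_go_switched first second starting_at k location sum_min hkz]
      simp [hn, hk]
    | false =>
      rw [sr_go_unswitched first second starting_at k location sum_min hkz]
      simp [hn, hk]
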